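-- pv_equiv track=rewrite | github.com/ksj1368/Algorithm | 프로그래머스/2/60058. 괄호 변환/괄호 변환.py | split_bracket
-- ===== SOURCE A (Python) =====
-- def split_bracket(p):
--     cnt = 0
--     for i in range(len(p)):
--         if p[i] == '(':
--             cnt += 1
--         else:
--             cnt -= 1
--         if cnt == 0:
--             return p[:i+1], p[i+1:]
-- ===== SOURCE B (Python) =====
-- def split_bracket(p):
--     # Build the full table of cumulative balances, then look up the first zero.
--     bal = []
--     c = 0
--     for ch in p:
--         c += 1 if ch == '(' else -1
--         bal.append(c)
--     if 0 in bal: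
--         i = bal.index(0)
--         return p[:i + 1], p[i + 1:]
--     return None
-- ===== Notes on version B (the rewrite author's own statement) =====
-- stated objective: alternative
-- what changed: B builds the whole cumulative-balance table in one pass and then locates the first zero with list.index, instead of A's single early-returning count-and-test loop.
import Mathlib
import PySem

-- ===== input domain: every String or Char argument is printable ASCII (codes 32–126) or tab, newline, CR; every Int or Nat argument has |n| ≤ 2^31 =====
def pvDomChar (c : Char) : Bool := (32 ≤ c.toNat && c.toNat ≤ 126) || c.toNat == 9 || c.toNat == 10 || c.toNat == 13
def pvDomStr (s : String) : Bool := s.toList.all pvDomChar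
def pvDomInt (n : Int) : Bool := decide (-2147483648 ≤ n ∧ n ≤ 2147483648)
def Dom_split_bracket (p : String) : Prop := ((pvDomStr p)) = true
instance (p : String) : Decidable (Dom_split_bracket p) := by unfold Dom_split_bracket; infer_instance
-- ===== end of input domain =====

-- B replaces A's early-returning count-and-test loop by a cumulative-balance table plus a first-zero lookup (objective: alternative).

-- ===== PORT A =====
-- the loop 'for i in range(len(p)): cnt ± 1; if cnt == 0: return p[:i+1], p[i+1:]';
-- falls off the end (Python returns None) → dummy ("",""), excluded by Pre_.
def split_bracket_go (l : List Char) (rest : List Char) (i : Nat) (cnt : Int) : String × String :=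
  match rest with
  | [] => ("", "")
  | c :: rs =>
    let cnt' := if c = '(' then cnt + 1 else cnt - 1
    if cnt' = 0 then (String.ofList (l.take (i + 1)), String.ofList (l.drop (i + 1)))
    else split_bracket_go l rs (i + 1) cnt'

def split_bracket (p : String) : String × String :=
  split_bracket_go p.toList p.toList 0 0

-- ===== PORT B =====
-- build the cumulative-balance table (Source B's append loop = foldl with acc ++ [c]),
-- then look up the first zero; no zero → Python returns None → dummy ("",""), excluded by Pre_.
def split_bracket_alt (p : String) : String × String :=
  let bal := (p.toList.foldl
    (fun (acc : List Int × Int) ch =>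
      let c := acc.2 + (if ch = '(' then 1 else -1)
      (acc.1 ++ [c], c)) (([] : List Int), (0 : Int))).1
  match PySem.List.index? bal 0 with
  | some i => (String.ofList (p.toList.take (i + 1)), String.ofList (p.toList.drop (i + 1)))
  | none => ("", "")

-- ===== PRECONDITION & SPEC =====
-- Pre_ excludes exactly the inputs with no prefix of balance zero, on which Python A
-- falls through and returns None (not a value of the declared pair type).
def Pre_split_bracket (p : String) : Prop :=
  ∃ i, i < p.toList.length ∧ 2 * (((p.toList.take (i + 1)).count '(' : Nat) : Int) = ((i : Int) + 1)
instance (p : String) : Decidable (Pre_split_bracket p) := by unfold Pre_split_bracket; infer_instance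

def pvWitness_split_bracket : String := "()"

def Spec_split_bracket (p : String) (out : String × String) : Prop := out = split_bracket_alt p
instance (p : String) (out : String × String) : Decidable (Spec_split_bracket p out) := by unfold Spec_split_bracket; infer_instance

-- ===== CLAIM (what is proved, stated in full; the proofs are below) =====
def Claim_equal_split_bracket : Prop := ∀ (p : String), Dom_split_bracket p → Pre_split_bracket p → Spec_split_bracket p (split_bracket p)

-- ===== LEMMAS AND PROOFS =====

-- the cumulative-balance table starting from balance cnt
def balTable (l : List Char) (cnt : Int) : List Int :=
  match l with
  | [] => []
  | c :: rs =>
    let c' := cnt + (if c = '(' then 1 else -1)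
    c' :: balTable rs c'

theorem foldl_balTable (l : List Char) (acc : List Int) (cnt : Int) :
    (l.foldl (fun (acc : List Int × Int) ch =>
      let c := acc.2 + (if ch = '(' then 1 else -1)
      (acc.1 ++ [c], c)) (acc, cnt)).1 = acc ++ balTable l cnt := by
  induction l generalizing acc cnt with
  | nil => simp [balTable]
  | cons c rs ih => simp [balTable, ih]

theorem go_eq_index (P : List Char) (l : List Char) (i : Nat) (cnt : Int) :
    split_bracket_go P l i cnt =
      match PySem.List.index? (balTable l cnt) 0 with
      | some j => (String.ofList (P.take (i + j + 1)), String.ofList (P.drop (i + j + 1)))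
      | none => ("", "") := by
  induction l generalizing i cnt with
  | nil => simp [split_bracket_go, balTable, PySem.List.index?]
  | cons c rs ih =>
    have hc : (if c = '(' then cnt + 1 else cnt - 1) = cnt + (if c = '(' then 1 else -1) := by
      split_ifs <;> ring
    simp only [split_bracket_go, balTable, hc]
    by_cases h0 : cnt + (if c = '(' then 1 else -1) = 0
    · rw [if_pos h0, h0, PySem.List.index?_cons_self]
    · rw [if_neg h0, ih, PySem.List.index?_cons_of_ne _ h0]
      cases h : PySem.List.index? (balTable rs (cnt + (if c = '(' then 1 else -1))) 0 with
      | none => rfl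
      | some j =>
        simp only [Option.map_some]
        have hj : i + 1 + j + 1 = i + (j + 1) + 1 := by omega
        rw [hj]

-- ===== VERDICT (by name: the statement is the Claim_ definition above) =====
theorem split_bracket_spec : Claim_equal_split_bracket := by
  intro p _ _
  unfold Spec_split_bracket split_bracket split_bracket_alt
  rw [go_eq_index, foldl_balTable]
  simp only [List.nil_append]
  cases PySem.List.index? (balTable p.toList 0) 0 <;> simp
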